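-- pv_equiv track=rewrite | github.com/thekevinscott/gbnf | packages/gbnfpy/gbnf/rules_builder/errors.py | build_error_position
-- ===== SOURCE A (Python) =====
-- MAXIMUM_NUMBER_OF_ERROR_LINES_TO_SHOW = 3
--
-- def build_error_position(src: str, pos: int) -> list[str]:
--     if src == "":
--         return ["No input provided"]
--     grammar_lines = src.split("\n")
--     line_idx = 0
--     while line_idx < len(grammar_lines) and pos > len(grammar_lines[line_idx]) - 1:
--         pos -= len(grammar_lines[line_idx])
--         line_idx += 1
--
--     start_line = max(0, line_idx - (MAXIMUM_NUMBER_OF_ERROR_LINES_TO_SHOW - 1))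
--     lines_to_show = [
--         grammar_lines[i]
--         for i in range(start_line, line_idx + 1)
--         if i < len(grammar_lines)
--     ]
--
--     # Append the position marker
--     return [*lines_to_show, " " * pos + "^"]
-- ===== SOURCE B (Python) =====
-- MAXIMUM_NUMBER_OF_ERROR_LINES_TO_SHOW = 3
--
--
-- def build_error_position(src: str, pos: int) -> list[str]:
--     if src == "":
--         return ["No input provided"]
--     lines = src.split("\n")
--     # cumulative end-offsets of the lines (newlines not counted, as in the original)
--     offsets = []
--     total = 0
--     for line in lines:
--         total += len(line)
--         offsets.append(total)
--     # binary search: first index whose cumulative end exceeds pos (capped at len(lines))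
--     lo, hi = 0, len(lines)
--     while lo < hi:
--         mid = (lo + hi) // 2
--         if offsets[mid] <= pos:
--             lo = mid + 1
--         else:
--             hi = mid
--     line_idx = lo
--     residual = pos - (offsets[line_idx - 1] if line_idx > 0 else 0)
--     start = max(0, line_idx - (MAXIMUM_NUMBER_OF_ERROR_LINES_TO_SHOW - 1))
--     return [*lines[start:line_idx + 1], " " * residual + "^"]
-- ===== Notes on version B (the rewrite author's own statement) =====
-- stated objective: alternative
-- what changed: The decrementing subtract-and-walk while loop is replaced by a cumulative line-length offset table plus a binary search for the error line, with the context taken by a direct slice instead of a filtered index comprehension.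
import Mathlib
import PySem

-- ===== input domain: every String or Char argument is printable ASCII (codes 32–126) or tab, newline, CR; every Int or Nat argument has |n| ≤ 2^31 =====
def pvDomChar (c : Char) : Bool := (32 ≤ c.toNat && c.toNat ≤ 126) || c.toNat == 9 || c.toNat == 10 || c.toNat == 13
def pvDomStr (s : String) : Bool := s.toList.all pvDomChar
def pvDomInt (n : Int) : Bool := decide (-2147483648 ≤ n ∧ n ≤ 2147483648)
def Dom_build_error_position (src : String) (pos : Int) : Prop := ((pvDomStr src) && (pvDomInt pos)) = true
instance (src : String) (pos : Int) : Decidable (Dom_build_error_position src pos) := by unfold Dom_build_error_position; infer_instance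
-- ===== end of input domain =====

-- B replaces A's decrementing subtract-and-walk loop by a cumulative-offset table plus a binary
-- search for the error line, and takes the context lines by a slice (objective: alternative).

-- ===== PORT A =====
-- the `while line_idx < len(grammar_lines) and pos > len(grammar_lines[line_idx]) - 1:` loop,
-- as structural recursion over the not-yet-visited lines; returns the final (pos, line_idx)
def pvALoop (rest : List String) (pos : Int) (idx : Nat) : Int × Nat :=
  match rest with
  | [] => (pos, idx)
  | l :: rest' =>
    if PySem.Str.len l - 1 < pos then pvALoop rest' (pos - PySem.Str.len l) (idx + 1)
    else (pos, idx)

def build_error_position (src : String) (pos : Int) : List String :=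
  if src = "" then ["No input provided"]
  else
    let grammar_lines := (PySem.Str.split? src "\n").getD []   -- sep "\n" ≠ "", so never none
    let r := pvALoop grammar_lines pos 0
    let start_line : Int := max 0 ((r.2 : Int) - (3 - 1))
    let lines_to_show := ((PySem.List.pyRange start_line ((r.2 : Int) + 1) 1).filter
        (fun i => decide (i < (grammar_lines.length : Int)))).map
      (fun i => PySem.List.pyGetD grammar_lines i "")           -- guarded by the filter, always in range
    lines_to_show ++ [String.ofList (List.replicate r.1.toNat ' ' ++ ['^'])]

-- ===== PORT B =====
-- the `for line in lines: total += len(line); offsets.append(total)` loop of Source B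
def pvOffsetsLoop (ls : List String) (acc : List Int) (total : Int) : List Int :=
  match ls with
  | [] => acc
  | l :: r => pvOffsetsLoop r (acc ++ [total + PySem.Str.len l]) (total + PySem.Str.len l)

-- the hand-written `while lo < hi:` binary search of Source B (indices always in range)
def pvBSearch (offsets : List Int) (pos : Int) (lo hi : Nat) : Nat :=
  if _h : lo < hi then
    if PySem.List.pyGetD offsets (((lo + hi) / 2 : Nat) : Int) 0 ≤ pos then
      pvBSearch offsets pos ((lo + hi) / 2 + 1) hi
    else pvBSearch offsets pos lo ((lo + hi) / 2)
  else lo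
termination_by hi - lo
decreasing_by all_goals omega

def build_error_position_alt (src : String) (pos : Int) : List String :=
  if src = "" then ["No input provided"]
  else
    let lines := (PySem.Str.split? src "\n").getD []           -- sep "\n" ≠ "", so never none
    let offsets := pvOffsetsLoop lines [] 0
    let line_idx := pvBSearch offsets pos 0 lines.length
    let residual := pos -
      (if 0 < line_idx then PySem.List.pyGetD offsets ((line_idx : Int) - 1) 0 else 0)
    let start : Int := max 0 ((line_idx : Int) - (3 - 1))
    PySem.List.slice lines (some start) (some ((line_idx : Int) + 1))
      ++ [String.ofList (List.replicate residual.toNat ' ' ++ ['^'])]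

-- ===== PRECONDITION & SPEC =====
def Spec_build_error_position (src : String) (pos : Int) (out : List String) : Prop := out = build_error_position_alt src pos
instance (src : String) (pos : Int) (out : List String) : Decidable (Spec_build_error_position src pos out) := by unfold Spec_build_error_position; infer_instance

-- ===== CLAIM (what is proved, stated in full; the proofs are below) =====
def Claim_equal_build_error_position : Prop := ∀ (src : String) (pos : Int), Dom_build_error_position src pos → Spec_build_error_position src pos (build_error_position src pos)

-- ===== LEMMAS AND PROOFS =====

-- sum of the lengths of a list of lines
def pvSumLens (ls : List String) : Int := (ls.map PySem.Str.len).sum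

-- the line index A's while loop ends at
def pvIdx (ls : List String) (pos : Int) : Nat :=
  match ls with
  | [] => 0
  | l :: r => if PySem.Str.len l - 1 < pos then pvIdx r (pos - PySem.Str.len l) + 1 else 0

-- the cumulative offsets, recursively
def pvOffsFrom (ls : List String) (c : Int) : List Int :=
  match ls with
  | [] => []
  | l :: r => (c + PySem.Str.len l) :: pvOffsFrom r (c + PySem.Str.len l)

theorem pvALoop_eq (ls : List String) (pos : Int) (idx : Nat) :
    pvALoop ls pos idx = (pos - pvSumLens (ls.take (pvIdx ls pos)), idx + pvIdx ls pos) := by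
  induction ls generalizing pos idx with
  | nil => simp [pvALoop, pvIdx, pvSumLens]
  | cons l r ih =>
    simp only [pvALoop, pvIdx]
    by_cases h : PySem.Str.len l - 1 < pos
    · simp only [if_pos h, ih]
      simp only [List.take_succ_cons, pvSumLens, List.map_cons, List.sum_cons, Prod.mk.injEq]
      exact ⟨by ring, by omega⟩
    · simp only [if_neg h, List.take_zero, pvSumLens, List.map_nil, List.sum_nil,
        sub_zero, Nat.add_zero]

theorem pvIdx_le (ls : List String) (pos : Int) : pvIdx ls pos ≤ ls.length := by
  induction ls generalizing pos with
  | nil => simp [pvIdx]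
  | cons l r ih =>
    simp only [pvIdx, List.length_cons]
    split
    · exact Nat.succ_le_succ (ih _)
    · omega

theorem pvIdx_spec (ls : List String) (pos : Int) :
    (∀ j : Nat, j < pvIdx ls pos → pvSumLens (ls.take (j + 1)) ≤ pos) ∧
    (pvIdx ls pos < ls.length → pos < pvSumLens (ls.take (pvIdx ls pos + 1))) := by
  induction ls generalizing pos with
  | nil => simp [pvIdx]
  | cons l r ih =>
    simp only [pvIdx]
    by_cases h : PySem.Str.len l - 1 < pos
    · simp only [if_pos h]
      obtain ⟨ih1, ih2⟩ := ih (pos - PySem.Str.len l)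
      constructor
      · intro j hj
        cases j with
        | zero =>
          simp only [List.take_succ_cons, List.take_zero, pvSumLens, List.map_cons,
            List.map_nil, List.sum_cons, List.sum_nil]
          omega
        | succ j' =>
          have := ih1 j' (by omega)
          simp only [List.take_succ_cons, pvSumLens, List.map_cons, List.sum_cons] at *
          omega
      · intro hlt
        have := ih2 (by simpa using hlt)
        simp only [List.take_succ_cons, pvSumLens, List.map_cons, List.sum_cons] at *
        omega
    · simp only [if_neg h]
      constructor
      · intro j hj; omega
      · intro _
        simp only [List.take_succ_cons, List.take_zero, pvSumLens, List.map_cons,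
          List.map_nil, List.sum_cons, List.sum_nil]
        omega

theorem pvOffsetsLoop_eq (ls : List String) (acc : List Int) (c : Int) :
    pvOffsetsLoop ls acc c = acc ++ pvOffsFrom ls c := by
  induction ls generalizing acc c with
  | nil => simp [pvOffsetsLoop, pvOffsFrom]
  | cons l r ih => simp [pvOffsetsLoop, pvOffsFrom, ih]

theorem pvOffsFrom_length (ls : List String) (c : Int) : (pvOffsFrom ls c).length = ls.length := by
  induction ls generalizing c with
  | nil => simp [pvOffsFrom]
  | cons l r ih => simp [pvOffsFrom, ih]

theorem pvOffsFrom_getD (ls : List String) (c : Int) (j : Nat) (hj : j < ls.length) :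
    (pvOffsFrom ls c).getD j 0 = c + pvSumLens (ls.take (j + 1)) := by
  induction ls generalizing c j with
  | nil => simp at hj
  | cons l r ih =>
    cases j with
    | zero => simp [pvOffsFrom, pvSumLens]
    | succ j' =>
      simp only [pvOffsFrom, List.getD_cons_succ, List.take_succ_cons, pvSumLens,
        List.map_cons, List.sum_cons]
      rw [ih _ j' (by simpa using hj)]
      simp [pvSumLens]; ring

theorem pvSumLens_take_mono (ls : List String) {i j : Nat} (h : i ≤ j) :
    pvSumLens (ls.take i) ≤ pvSumLens (ls.take j) := by
  have hj : j = i + (j - i) := by omega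
  rw [hj, List.take_add]
  simp only [pvSumLens, List.map_append, List.sum_append]
  have h0 : (0 : Int) ≤ (((ls.drop i).take (j - i)).map PySem.Str.len).sum := by
    refine List.sum_nonneg ?_
    intro x hx
    simp only [List.mem_map] at hx
    obtain ⟨a, -, rfl⟩ := hx
    simp [PySem.Str.len_eq]
  omega

theorem pvBSearch_spec (offs : List Int) (pos : Int)
    (hmono : ∀ i j : Nat, i ≤ j → j < offs.length → offs.getD i 0 ≤ offs.getD j 0)
    (fuel : Nat) :
    ∀ lo hi : Nat, hi - lo ≤ fuel → lo ≤ hi → hi ≤ offs.length →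
    (∀ j : Nat, j < lo → offs.getD j 0 ≤ pos) →
    (∀ j : Nat, hi ≤ j → j < offs.length → pos < offs.getD j 0) →
    pvBSearch offs pos lo hi ≤ offs.length ∧
    (∀ j : Nat, j < pvBSearch offs pos lo hi → offs.getD j 0 ≤ pos) ∧
    (∀ j : Nat, pvBSearch offs pos lo hi ≤ j → j < offs.length → pos < offs.getD j 0) := by
  induction fuel with
  | zero =>
    intro lo hi hfuel hle hhi hlow hhigh
    have heq : lo = hi := by omega
    rw [pvBSearch, dif_neg (by omega : ¬ lo < hi)]
    exact ⟨by omega, hlow, fun j h1 h2 => hhigh j (by omega) h2⟩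
  | succ n ih =>
    intro lo hi hfuel hle hhi hlow hhigh
    rw [pvBSearch]
    by_cases h : lo < hi
    · simp only [dif_pos h]
      have hmid : (lo + hi) / 2 < hi := by omega
      have hmid' : lo ≤ (lo + hi) / 2 := by omega
      by_cases hc : PySem.List.pyGetD offs (((lo + hi) / 2 : Nat) : Int) 0 ≤ pos
      · rw [if_pos hc]
        rw [PySem.List.pyGetD_natCast] at hc
        refine ih ((lo + hi) / 2 + 1) hi (by omega) (by omega) hhi ?_ hhigh
        intro j hj
        exact le_trans (hmono j ((lo + hi) / 2) (by omega) (by omega)) hc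
      · rw [if_neg hc]
        rw [PySem.List.pyGetD_natCast] at hc
        rw [not_le] at hc
        refine ih lo ((lo + hi) / 2) (by omega) (by omega) (by omega) hlow ?_
        intro j hj hjlen
        exact lt_of_lt_of_le hc (hmono _ j hj hjlen)
    · rw [dif_neg h]
      exact ⟨by omega, hlow, fun j h1 h2 => hhigh j (by omega) h2⟩

-- uniqueness of the "first index whose offset exceeds pos, capped at len"
theorem pvIdx_unique (len : Nat) (f : Nat → Int) (pos : Int) (a b : Nat)
    (ha1 : a ≤ len) (hb1 : b ≤ len)
    (ha2 : ∀ j, j < a → f j ≤ pos) (ha3 : a < len → pos < f a)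
    (hb2 : ∀ j, j < b → f j ≤ pos) (hb3 : b < len → pos < f b) : a = b := by
  by_contra hne
  rcases Nat.lt_or_ge a b with hab | hab
  · have h1 := hb2 a hab
    have h2 := ha3 (by omega)
    omega
  · have hba : b < a := by omega
    have h1 := ha2 b hba
    have h2 := hb3 (by omega)
    omega

-- the filtered index comprehension of A equals the drop/take slice of B
theorem pvCtx_eq {α : Type} (xs : List α) (d : α) (fuel : Nat) :
    ∀ s m : Nat, m - s ≤ fuel →
    ((PySem.List.pyRange (s : Int) (m : Int) 1).filter
        (fun i => decide (i < (xs.length : Int)))).map (fun i => PySem.List.pyGetD xs i d)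
      = (xs.drop s).take (m - s) := by
  induction fuel with
  | zero =>
    intro s m hf
    have : m ≤ s := by omega
    rw [PySem.List.pyRange_one_eq_nil (by exact_mod_cast this)]
    simp; omega
  | succ n ih =>
    intro s m hf
    by_cases h : s < m
    · rw [PySem.List.pyRange_one_cons (by exact_mod_cast h)]
      rw [List.filter_cons]
      have hcast : ((s : Int) + 1) = ((s + 1 : Nat) : Int) := by push_cast; ring
      by_cases hn : s < xs.length
      · rw [if_pos (by simpa using (by exact_mod_cast hn : (s : Int) < (xs.length : Int)))]
        rw [List.map_cons, hcast, ih (s + 1) m (by omega)]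
        rw [PySem.List.pyGetD_natCast]
        rw [List.drop_eq_getElem_cons hn]
        have : m - s = (m - (s + 1)) + 1 := by omega
        rw [this, List.take_succ_cons, List.getD_eq_getElem xs d hn]
      · rw [if_neg (by simpa using (by exact_mod_cast hn : ¬ (s : Int) < (xs.length : Int)))]
        rw [hcast, ih (s + 1) m (by omega)]
        have hdrop : xs.drop s = [] := List.drop_eq_nil_of_le (by omega)
        have hdrop' : xs.drop (s + 1) = [] := List.drop_eq_nil_of_le (by omega)
        simp [hdrop, hdrop']
    · rw [PySem.List.pyRange_one_eq_nil (by exact_mod_cast (by omega : m ≤ s))]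
      simp
      omega

-- ===== VERDICT (by name: the statement is the Claim_ definition above) =====
theorem build_error_position_spec : Claim_equal_build_error_position := by
  intro src pos _
  unfold Spec_build_error_position
  by_cases hsrc : src = ""
  · simp [build_error_position, build_error_position_alt, hsrc]
  · simp only [build_error_position, build_error_position_alt, if_neg hsrc]
    rw [pvALoop_eq, pvOffsetsLoop_eq]
    simp only [List.nil_append, Nat.zero_add]
    set lines := (PySem.Str.split? src "\n").getD [] with hlines
    set offs := pvOffsFrom lines 0 with hoffs
    set k := pvIdx lines pos with hkdef
    have hlen : offs.length = lines.length := pvOffsFrom_length lines 0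
    have hk_le : k ≤ lines.length := pvIdx_le lines pos
    have hgetD : ∀ j : Nat, j < lines.length → offs.getD j 0 = pvSumLens (lines.take (j+1)) := by
      intro j hj
      rw [hoffs, pvOffsFrom_getD lines 0 j hj]
      ring
    have hmono : ∀ i j : Nat, i ≤ j → j < offs.length → offs.getD i 0 ≤ offs.getD j 0 := by
      intro i j hij hj
      rw [hlen] at hj
      rw [hgetD i (by omega), hgetD j hj]
      exact pvSumLens_take_mono lines (by omega)
    obtain ⟨hr1, hr2, hr3⟩ := pvBSearch_spec offs pos hmono lines.length 0 lines.length
      (by omega) (by omega) (by omega) (fun j hj => absurd hj (Nat.not_lt_zero j))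
      (by intro j h1 h2; omega)
    obtain ⟨hi1, hi2⟩ := pvIdx_spec lines pos
    have hbk : pvBSearch offs pos 0 lines.length = k := by
      refine pvIdx_unique lines.length (fun j => offs.getD j 0) pos _ k (by omega) hk_le
        hr2 (fun hlt => hr3 _ (le_refl _) (by omega)) ?_ ?_
      · intro j hj
        show offs.getD j 0 ≤ pos
        rw [hgetD j (by omega)]
        exact hi1 j hj
      · intro hlt
        show pos < offs.getD k 0
        rw [hgetD k hlt]
        exact hi2 hlt
    rw [hbk]
    have hres : (if 0 < k then PySem.List.pyGetD offs ((k : Int) - 1) 0 else 0)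
        = pvSumLens (lines.take k) := by
      by_cases hk0 : 0 < k
      · rw [if_pos hk0]
        have hc : ((k : Int) - 1) = ((k - 1 : Nat) : Int) := by omega
        rw [hc, PySem.List.pyGetD_natCast, hgetD (k - 1) (by omega)]
        congr 2
        omega
      · rw [if_neg hk0]
        have : k = 0 := by omega
        simp [this, pvSumLens]
    rw [hres]
    have hmax : (max 0 ((k : Int) - (3 - 1))) = ((k - 2 : Nat) : Int) := by omega
    have hc1 : ((k : Int) + 1) = ((k + 1 : Nat) : Int) := by push_cast; ring
    rw [hmax, hc1, pvCtx_eq lines "" (k + 1) (k - 2) (k + 1) (by omega)]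
    rw [PySem.List.slice_toNat lines (by positivity) (by positivity)]
    simp
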